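-- pv_equiv track=rewrite | github.com/apaolillo/adventofcode | 2021/day14/day14a.py | get_count_from_string
-- ===== SOURCE A (Python) =====
-- def get_count_from_string(string, rules):
--     result = dict()
--     for i in range(len(string) - 1):
--         key = string[i:i+2]
--         val = rules[key]
--         if val not in result:
--             result[val] = 0
--         result[val] += 1
--     return result
-- ===== SOURCE B (Python) =====
-- def get_count_from_string(string, rules):
--     # Count distinct adjacent character pairs first (zipping the string with
--     # its own tail), then map each distinct pair through the rules once,
--     # accumulating its multiplicity.
--     pairs = {}
--     for a, b in zip(string, string[1:]):
--         p = a + b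
--         pairs[p] = pairs.get(p, 0) + 1
--     result = {}
--     for p, c in pairs.items():
--         val = rules[p]
--         result[val] = result.get(val, 0) + c
--     return result
-- ===== Notes on version B (the rewrite author's own statement) =====
-- stated objective: alternative
-- what changed: B zips the string with its own tail to build a frequency table of the distinct adjacent pairs, then in a second pass maps each distinct pair through the rules exactly once and adds its multiplicity, instead of A's single per-index slicing loop that looks up the rules and increments by one at every position.
import Mathlib
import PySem

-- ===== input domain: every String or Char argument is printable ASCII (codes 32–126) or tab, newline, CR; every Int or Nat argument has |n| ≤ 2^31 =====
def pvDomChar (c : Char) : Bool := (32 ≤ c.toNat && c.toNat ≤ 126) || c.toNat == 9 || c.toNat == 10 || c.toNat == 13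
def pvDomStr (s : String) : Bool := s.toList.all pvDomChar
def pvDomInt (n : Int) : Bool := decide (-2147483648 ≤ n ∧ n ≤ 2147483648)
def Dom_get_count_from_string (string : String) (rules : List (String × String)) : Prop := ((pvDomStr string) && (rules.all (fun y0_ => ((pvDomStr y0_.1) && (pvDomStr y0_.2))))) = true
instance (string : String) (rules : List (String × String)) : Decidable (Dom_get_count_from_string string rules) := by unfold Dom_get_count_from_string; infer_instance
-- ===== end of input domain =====

-- B zips the string with its own tail to count distinct adjacent pairs first, then maps
-- each distinct pair through the rules once (alternative two-pass decomposition; same cost).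


-- ===== PORT A =====
-- Python `rules[key]` on the dict (assoc list, first match); a missing key is a KeyError,
-- excluded by Pre_, so the "" default is never reached on admitted inputs. (Both Pythons
-- perform this exact lookup, so the helper is shared by both ports.)
def pvRuleGet (rules : List (String × String)) (key : String) : String :=
  ((rules.find? (fun p => p.1 == key)).map Prod.snd).getD ""

def get_count_from_string (string : String) (rules : List (String × String)) : List (String × Int) :=
  ((PySem.List.pyRange 0 (PySem.Str.len string - 1) 1).foldl (fun result i =>
      let key := PySem.Str.slice string (some i) (some (i + 2))
      let val := pvRuleGet rules key
      let result := if result.contains val then result else result.insert val (0 : Int)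
      result.modify val 0 (· + 1))
    PySem.Dict.empty).items

-- ===== PORT B =====
def get_count_from_string_alt (string : String) (rules : List (String × String)) : List (String × Int) :=
  let pairs := (string.toList.zip string.toList.tail).foldl (fun pairs ab =>
      let p := String.ofList [ab.1, ab.2]
      pairs.insert p (pairs.getD p 0 + 1))
    PySem.Dict.empty
  (pairs.items.foldl (fun result pc =>
      let val := pvRuleGet rules pc.1
      result.insert val (result.getD val 0 + pc.2))
    PySem.Dict.empty).items

-- ===== PRECONDITION & SPEC =====
-- Pre_ excludes exactly the inputs on which the Python raises KeyError: some adjacent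
-- two-character window of `string` is not a key of `rules`.
def Pre_get_count_from_string (string : String) (rules : List (String × String)) : Prop :=
  ∀ i ∈ List.range (string.toList.length - 1),
    ((string.toList.drop i).take 2) ∈ rules.map (fun r => r.1.toList)
instance (string : String) (rules : List (String × String)) : Decidable (Pre_get_count_from_string string rules) := by unfold Pre_get_count_from_string; infer_instance

def pvWitness_get_count_from_string : String × (List (String × String)) :=
  ("ABAB", [("AB", "X"), ("BA", "Y")])

def Spec_get_count_from_string (string : String) (rules : List (String × String)) (out : List (String × Int)) : Prop := out = get_count_from_string_alt string rules
instance (string : String) (rules : List (String × String)) (out : List (String × Int)) : Decidable (Spec_get_count_from_string string rules out) := by unfold Spec_get_count_from_string; infer_instance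

-- ===== CLAIM (what is proved, stated in full; the proofs are below) =====
def Claim_equal_get_count_from_string : Prop := ∀ (string : String) (rules : List (String × String)), Dom_get_count_from_string string rules → Pre_get_count_from_string string rules → Spec_get_count_from_string string rules (get_count_from_string string rules)

-- ===== LEMMAS AND PROOFS =====

-- Two in-place value overwrites at distinct keys commute when the first key is already
-- present (so neither changes the other's position or value).
theorem pvInsertComm {ν : Type} (d : PySem.Dict String ν) {k k' : String} (A B : ν)
    (hne : k' ≠ k) (hk : d.contains k = true) :
    (d.insert k A).insert k' B = (d.insert k' B).insert k A := by
  apply PySem.Dict.ext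
  have hk1 : (d.insert k' B).contains k = true := by
    rw [PySem.Dict.contains_insert]; simp [hk]
  cases hc' : d.contains k' with
  | true =>
    have hk2 : (d.insert k A).contains k' = true := by
      rw [PySem.Dict.contains_insert]; simp [hc']
    rw [PySem.Dict.items_insert_of_contains _ _ hk2,
        PySem.Dict.items_insert_of_contains _ _ hk,
        PySem.Dict.items_insert_of_contains _ _ hk1,
        PySem.Dict.items_insert_of_contains _ _ hc',
        List.map_map, List.map_map]
    apply List.map_congr_left
    intro p _
    simp only [Function.comp_apply, beq_iff_eq]
    by_cases hp : p.1 = k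
    · simp [hp, Ne.symm hne]
    · by_cases hp' : p.1 = k' <;> simp [hp, hp', hne]
  | false =>
    have hk2 : (d.insert k A).contains k' = false := by
      rw [PySem.Dict.contains_insert]; simp [hc', hne]
    rw [PySem.Dict.items_insert_of_not_contains _ _ hk2,
        PySem.Dict.items_insert_of_contains _ _ hk,
        PySem.Dict.items_insert_of_contains _ _ hk1,
        PySem.Dict.items_insert_of_not_contains _ _ hc',
        List.map_append]
    simp only [List.map_cons, List.map_nil, beq_iff_eq]
    rw [if_neg hne]

-- `r[k] = r.get(k, 0) + c`, the single accumulation step both programs reduce to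
def pvBump (r : PySem.Dict String Int) (k : String) (c : Int) : PySem.Dict String Int :=
  r.insert k (r.getD k 0 + c)

-- B's second pass, run from an arbitrary result dict over an arbitrary items list
def pvApply (rules : List (String × String)) (r : PySem.Dict String Int)
    (L : List (String × Int)) : PySem.Dict String Int :=
  L.foldl (fun result pc => pvBump result (pvRuleGet rules pc.1) pc.2) r

lemma pvBump_contains (r : PySem.Dict String Int) (k : String) (c : Int) (k' : String) :
    (pvBump r k c).contains k' = (k' == k || r.contains k') := by
  simp [pvBump, PySem.Dict.contains_insert]

lemma pvBump_bump_same (r : PySem.Dict String Int) (k : String) (c1 c2 : Int) :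
    pvBump (pvBump r k c1) k c2 = pvBump r k (c1 + c2) := by
  simp [pvBump, PySem.Dict.getD_insert_self, PySem.Dict.insert_insert_self, add_assoc]

lemma pvBump_comm (r : PySem.Dict String Int) {k k' : String} (c a : Int)
    (h : r.contains k = true) (hne : k' ≠ k) :
    pvBump (pvBump r k a) k' c = pvBump (pvBump r k' c) k a := by
  unfold pvBump
  rw [PySem.Dict.getD_insert_of_ne _ _ _ hne, PySem.Dict.getD_insert_of_ne _ _ _ (Ne.symm hne)]
  exact pvInsertComm r _ _ hne h

-- a bump at a key already present commutes past B's whole second pass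
lemma pvApply_bump (rules : List (String × String)) (L : List (String × Int))
    (r : PySem.Dict String Int) (k : String) (a : Int) (h : r.contains k = true) :
    pvApply rules (pvBump r k a) L = pvBump (pvApply rules r L) k a := by
  induction L generalizing r with
  | nil => rfl
  | cons q L' ih =>
    simp only [pvApply, List.foldl_cons]
    have hswap : pvBump (pvBump r k a) (pvRuleGet rules q.1) q.2
        = pvBump (pvBump r (pvRuleGet rules q.1) q.2) k a := by
      by_cases he : pvRuleGet rules q.1 = k
      · rw [he, pvBump_bump_same, pvBump_bump_same, add_comm]
      · exact pvBump_comm r q.2 a h he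
    rw [hswap]
    exact ih (pvBump r (pvRuleGet rules q.1) q.2)
      (by rw [pvBump_contains]; simp [h])

-- raising the multiplicity of ONE entry of the items list by 1 = one extra unit bump
lemma pvApply_map_bump (rules : List (String × String)) (L : List (String × Int))
    (r : PySem.Dict String Int) (p : String) (c : Int)
    (hm : (p, c) ∈ L) (hnd : (L.map (fun q => q.1)).Nodup) :
    pvApply rules r (L.map (fun q => if q.1 == p then (p, c + 1) else q))
      = pvBump (pvApply rules r L) (pvRuleGet rules p) 1 := by
  induction L generalizing r with
  | nil => simp at hm
  | cons q L' ih =>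
    simp only [List.map_cons, List.nodup_cons] at hnd
    by_cases hq : q.1 = p
    · have hqe : q = (p, c) := by
        rcases List.mem_cons.mp hm with h1 | h1
        · exact h1.symm
        · exact absurd (List.mem_map_of_mem h1) (hq ▸ hnd.1)
      have hfix : L'.map (fun x => if x.1 == p then (p, c + 1) else x) = L' := by
        apply List.map_congr_left ?_ |>.trans L'.map_id
        intro x hx
        have : x.1 ≠ p := by
          intro h; apply hnd.1; rw [hq, ← h]; exact List.mem_map_of_mem hx
        simp [this]
      simp only [List.map_cons, hqe, beq_self_eq_true, pvApply, List.foldl_cons, hfix]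
      have h1 : (pvBump r (pvRuleGet rules p) c).contains (pvRuleGet rules p) = true := by
        rw [pvBump_contains]; simp
      calc (L'.foldl (fun result pc => pvBump result (pvRuleGet rules pc.1) pc.2)
              (pvBump r (pvRuleGet rules p) (c + 1)))
          = pvApply rules (pvBump (pvBump r (pvRuleGet rules p) c) (pvRuleGet rules p) 1) L' := by
            rw [pvBump_bump_same]; rfl
        _ = pvBump (pvApply rules (pvBump r (pvRuleGet rules p) c) L') (pvRuleGet rules p) 1 :=
            pvApply_bump rules L' _ _ 1 h1
        _ = pvBump (L'.foldl (fun result pc => pvBump result (pvRuleGet rules pc.1) pc.2)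
              (pvBump r (pvRuleGet rules p) c)) (pvRuleGet rules p) 1 := rfl
    · have hm' : (p, c) ∈ L' := by
        rcases List.mem_cons.mp hm with h1 | h1
        · exact absurd (congrArg Prod.fst h1.symm) hq
        · exact h1
      simp only [List.map_cons, pvApply, List.foldl_cons]
      rw [if_neg (by simp [hq] : ¬((q.1 == p) = true))]
      exact ih _ hm' hnd.2

-- one counter increment on the pair table = one extra unit bump after B's second pass
lemma pvApply_insert (rules : List (String × String)) (d : PySem.Dict String Int)
    (r : PySem.Dict String Int) (p : String) (hnd : d.keys.Nodup) :
    pvApply rules r (d.insert p (d.getD p 0 + 1)).items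
      = pvBump (pvApply rules r d.items) (pvRuleGet rules p) 1 := by
  cases hc : d.contains p with
  | false =>
    rw [PySem.Dict.items_insert_of_not_contains _ _ hc,
        PySem.Dict.getD_of_not_contains _ _ hc]
    simp only [pvApply, List.foldl_append, List.foldl_cons, List.foldl_nil, zero_add]
  | true =>
    have hs : (d.get? p).isSome := by rw [← PySem.Dict.contains_eq_isSome_get?]; exact hc
    obtain ⟨c, hg⟩ := Option.isSome_iff_exists.mp hs
    have hmem : (p, c) ∈ d.items := PySem.Dict.mem_items_of_get?_eq_some d hg
    have hgd : d.getD p 0 = c := PySem.Dict.getD_of_mem_items d hmem hnd 0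
    rw [PySem.Dict.items_insert_of_contains _ _ hc, hgd]
    exact pvApply_map_bump rules d.items r p c hmem (by simpa [PySem.Dict.keys] using hnd)

-- the invariant: count-then-map (B) equals map-each-occurrence (A) over any pair list
lemma pvMain (rules : List (String × String)) (ps : List String)
    (d : PySem.Dict String Int) (r : PySem.Dict String Int) (hnd : d.keys.Nodup) :
    pvApply rules r (ps.foldl (fun d p => d.insert p (d.getD p 0 + 1)) d).items
      = ps.foldl (fun r p => pvBump r (pvRuleGet rules p) 1) (pvApply rules r d.items) := by
  induction ps generalizing d with
  | nil => rfl
  | cons p t ih =>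
    simp only [List.foldl_cons]
    rw [ih _ (PySem.Dict.nodup_keys_insert d p _ hnd), pvApply_insert rules d r p hnd]

-- A's loop body (guarded zero-insert then += 1) is one unit bump
lemma pvStepA (d : PySem.Dict String Int) (v : String) :
    (if d.contains v then d else d.insert v (0 : Int)).modify v 0 (· + 1) = pvBump d v 1 := by
  cases hc : d.contains v with
  | true => rfl
  | false =>
    simp only [if_neg (by simp : ¬(false = true))]
    simp [PySem.Dict.modify, pvBump, PySem.Dict.getD_insert_self,
      PySem.Dict.insert_insert_self, PySem.Dict.getD_of_not_contains _ _ hc]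

-- A's index list mapped through the two-character slice IS the string zipped with its tail
lemma pvPairsEq (s : String) :
    (PySem.List.pyRange 0 (PySem.Str.len s - 1) 1).map
        (fun i => PySem.Str.slice s (some i) (some (i + 2)))
      = (s.toList.zip s.toList.tail).map (fun ab => String.ofList [ab.1, ab.2]) := by
  have hls : s.toList.length = s.length := by simp
  apply List.ext_getElem
  · simp [PySem.List.length_pyRange_one, PySem.Str.len_eq, List.length_zip, List.length_tail]
  · intro k h1 h2
    have hlen : k + 1 < s.toList.length := by
      simp [PySem.List.length_pyRange_one, PySem.Str.len_eq] at h1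
      omega
    simp only [List.getElem_map, PySem.List.getElem_pyRange_one, List.getElem_zip]
    have hz : (0 : Int) + (k : Int) = ((k : Nat) : Int) := by omega
    have h2' : ((k : Nat) : Int) + 2 = (((k + 2 : Nat)) : Int) := by push_cast; ring
    apply String.toList_inj.mp
    rw [hz, h2', PySem.Str.toList_slice, PySem.Chars.slice_eq_listSlice,
      PySem.List.slice_natCast]
    have hd : s.toList.drop k = s.toList[k] :: s.toList[k + 1] :: s.toList.drop (k + 2) := by
      rw [List.drop_eq_getElem_cons (by omega), List.drop_eq_getElem_cons (by omega)]
    rw [hd, show k + 2 - k = 2 from by omega]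
    show [s.toList[k], s.toList[k + 1]] = _
    simp [List.getElem_tail]

-- ===== VERDICT (by name: the statement is the Claim_ definition above) =====
theorem get_count_from_string_spec : Claim_equal_get_count_from_string := by
  intro string rules _ _
  unfold Spec_get_count_from_string
  simp only [get_count_from_string, get_count_from_string_alt]
  rw [PySem.List.foldl_congr_mem _ _
      (fun result i => pvBump result (pvRuleGet rules (PySem.Str.slice string (some i) (some (i + 2)))) 1)
      _ (fun acc i _ => pvStepA acc _),
    ← List.foldl_map (f := fun i : Int => PySem.Str.slice string (some i) (some (i + 2)))
      (g := fun r p => pvBump r (pvRuleGet rules p) 1),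
    pvPairsEq string,
    ← List.foldl_map (f := fun ab : Char × Char => String.ofList [ab.1, ab.2])
      (g := fun (d : PySem.Dict String Int) (p : String) => d.insert p (d.getD p 0 + 1))]
  simp only [pvBump]
  have key := pvMain rules
    ((string.toList.zip string.toList.tail).map (fun ab => String.ofList [ab.1, ab.2]))
    PySem.Dict.empty PySem.Dict.empty PySem.Dict.nodup_keys_empty
  simp only [pvApply, pvBump,
    show (PySem.Dict.empty : PySem.Dict String Int).items = [] from rfl,
    List.foldl_nil] at key
  exact congrArg PySem.Dict.items key.symm
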